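-- pv_equiv track=rewrite | github.com/antimatter-ai-org/guardrails | app/eval/labels.py | canonicalize_prediction_label
-- ===== SOURCE A (Python) =====
-- def canonicalize_prediction_label(label: str) -> str | None:
--     normalized = label.strip().lower()
--
--     if normalized in {"full name", "first name", "middle name", "last name", "name", "name initials", "nickname"}:
--         return "person"
--     if "email" in normalized:
--         return "email"
--     if "phone" in normalized:
--         return "phone"
--     if normalized in {"ner_per"} or "person" in normalized:
--         return "person"
--     if normalized in {"ner_org"} or "organization" in normalized or "org" in normalized:
--         return "organization"
--     if "ip" in normalized:
--         return "ip"
--     if "date" in normalized: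
--         return "date"
--     if normalized in {
--         "ner_loc",
--         "city",
--         "district",
--         "street address",
--         "postal code",
--         "street",
--         "region",
--         "country",
--         "house",
--         "building",
--         "apartment",
--         "geolocation",
--     }:
--         return "location"
--     if "location" in normalized or "address" in normalized:
--         return "location"
--     if "card" in normalized:
--         return "payment_card"
--
--     identifier_markers = (
--         "passport",
--         "document",
--         "snils",
--         "inn",
--         "ogrn",
--         "ssn",
--         "iban",
--         "swift",
--         "tin",
--         "vehicle",
--         "military",
--         "vin",
--         "id",
--     )
--     if any(marker in normalized for marker in identifier_markers):
--         return "identifier"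
--
--     if "secret" in normalized or "api key" in normalized:
--         return "secret"
--     return None
-- ===== SOURCE B (Python) =====
-- # Different algorithm: instead of a 12-branch decision chain, classify by rule *priority*.
-- # Exact labels are one hash lookup in _EXACT (label -> (priority, category)); substring
-- # markers live in ONE flat list sorted by ascending priority, scanned once with early
-- # exit: the scan stops as soon as its remaining priorities cannot beat the current best.
-- # First match in the ascending scan == minimum-priority match == A's first-true rule.
--
-- _EXACT = {
--     "full name": (0, "person"), "first name": (0, "person"), "middle name": (0, "person"),
--     "last name": (0, "person"), "name": (0, "person"), "name initials": (0, "person"),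
--     "nickname": (0, "person"),
--     "ner_per": (3, "person"),
--     "ner_org": (4, "organization"),
--     "ner_loc": (7, "location"), "city": (7, "location"), "district": (7, "location"),
--     "street address": (7, "location"), "postal code": (7, "location"), "street": (7, "location"),
--     "region": (7, "location"), "country": (7, "location"), "house": (7, "location"),
--     "building": (7, "location"), "apartment": (7, "location"), "geolocation": (7, "location"),
-- }
--
-- _SUBSTR = [
--     ("email", 1, "email"),
--     ("phone", 2, "phone"),
--     ("person", 3, "person"),
--     ("organization", 4, "organization"), ("org", 4, "organization"),
--     ("ip", 5, "ip"),
--     ("date", 6, "date"),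
--     ("location", 8, "location"), ("address", 8, "location"),
--     ("card", 9, "payment_card"),
--     ("passport", 10, "identifier"), ("document", 10, "identifier"), ("snils", 10, "identifier"),
--     ("inn", 10, "identifier"), ("ogrn", 10, "identifier"), ("ssn", 10, "identifier"),
--     ("iban", 10, "identifier"), ("swift", 10, "identifier"), ("tin", 10, "identifier"),
--     ("vehicle", 10, "identifier"), ("military", 10, "identifier"), ("vin", 10, "identifier"),
--     ("id", 10, "identifier"),
--     ("secret", 11, "secret"), ("api key", 11, "secret"),
-- ]
--
--
-- def canonicalize_prediction_label(label: str) -> str | None: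
--     normalized = label.strip().lower()
--     best = _EXACT.get(normalized)          # (priority, category) or None
--     for sub, pr, cat in _SUBSTR:           # ascending priority
--         if best is not None and pr >= best[0]:
--             break                          # nothing left can beat the exact match
--         if sub in normalized:
--             best = (pr, cat)
--             break                          # first match in ascending order is minimal
--     return best[1] if best is not None else None
-- ===== Notes on version B (the rewrite author's own statement) =====
-- stated objective: alternative
-- what changed: Replaced the 12-branch decision chain by priority-based classification: a hash map resolves exact labels to (priority, category), and a single flat list of substring markers sorted by ascending priority is scanned once with early exit; the minimum-priority match (= A's first-true rule) wins.
import Mathlib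
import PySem

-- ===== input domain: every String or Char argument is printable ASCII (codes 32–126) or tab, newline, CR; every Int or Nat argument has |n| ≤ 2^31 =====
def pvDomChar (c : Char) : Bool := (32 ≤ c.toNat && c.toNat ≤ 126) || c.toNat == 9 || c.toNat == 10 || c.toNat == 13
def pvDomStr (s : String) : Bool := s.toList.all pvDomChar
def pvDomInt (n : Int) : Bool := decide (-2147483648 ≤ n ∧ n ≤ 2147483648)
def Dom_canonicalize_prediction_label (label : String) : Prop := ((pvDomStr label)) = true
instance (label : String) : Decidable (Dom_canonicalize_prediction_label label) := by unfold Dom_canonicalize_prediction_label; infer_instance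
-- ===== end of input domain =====

-- B replaces A's 12-branch decision chain by a priority scheme: exact labels via one dict
-- lookup, substring markers in one ascending-priority list scanned with early exit.


-- ===== PORT A =====
def canonicalize_prediction_label (label : String) : Option String :=
  let normalized := PySem.Str.lower (PySem.Str.strip label)
  if (["full name", "first name", "middle name", "last name", "name", "name initials", "nickname"] : List String).contains normalized then
    some "person"
  else if PySem.Str.isIn "email" normalized then some "email"
  else if PySem.Str.isIn "phone" normalized then some "phone"
  else if (["ner_per"] : List String).contains normalized || PySem.Str.isIn "person" normalized then some "person"
  else if (["ner_org"] : List String).contains normalized || PySem.Str.isIn "organization" normalized || PySem.Str.isIn "org" normalized then some "organization"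
  else if PySem.Str.isIn "ip" normalized then some "ip"
  else if PySem.Str.isIn "date" normalized then some "date"
  else if (["ner_loc", "city", "district", "street address", "postal code", "street",
            "region", "country", "house", "building", "apartment", "geolocation"] : List String).contains normalized then
    some "location"
  else if PySem.Str.isIn "location" normalized || PySem.Str.isIn "address" normalized then some "location"
  else if PySem.Str.isIn "card" normalized then some "payment_card"
  else if (["passport", "document", "snils", "inn", "ogrn", "ssn", "iban", "swift",
            "tin", "vehicle", "military", "vin", "id"] : List String).any (fun marker => PySem.Str.isIn marker normalized) then
    some "identifier"
  else if PySem.Str.isIn "secret" normalized || PySem.Str.isIn "api key" normalized then some "secret"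
  else none

-- ===== PORT B =====
-- _EXACT of Source B: exact label -> (priority, category)
def pvExact : PySem.Dict String (Int × String) := PySem.Dict.mk
  [ ("full name", (0, "person")), ("first name", (0, "person")), ("middle name", (0, "person")),
    ("last name", (0, "person")), ("name", (0, "person")), ("name initials", (0, "person")),
    ("nickname", (0, "person")),
    ("ner_per", (3, "person")),
    ("ner_org", (4, "organization")),
    ("ner_loc", (7, "location")), ("city", (7, "location")), ("district", (7, "location")),
    ("street address", (7, "location")), ("postal code", (7, "location")), ("street", (7, "location")),
    ("region", (7, "location")), ("country", (7, "location")), ("house", (7, "location")),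
    ("building", (7, "location")), ("apartment", (7, "location")), ("geolocation", (7, "location")) ]

-- _SUBSTR of Source B: (marker, priority, category), ascending priority
def pvSubstr : List (String × Int × String) :=
  [ ("email", 1, "email"),
    ("phone", 2, "phone"),
    ("person", 3, "person"),
    ("organization", 4, "organization"), ("org", 4, "organization"),
    ("ip", 5, "ip"),
    ("date", 6, "date"),
    ("location", 8, "location"), ("address", 8, "location"),
    ("card", 9, "payment_card"),
    ("passport", 10, "identifier"), ("document", 10, "identifier"), ("snils", 10, "identifier"),
    ("inn", 10, "identifier"), ("ogrn", 10, "identifier"), ("ssn", 10, "identifier"),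
    ("iban", 10, "identifier"), ("swift", 10, "identifier"), ("tin", 10, "identifier"),
    ("vehicle", 10, "identifier"), ("military", 10, "identifier"), ("vin", 10, "identifier"),
    ("id", 10, "identifier"),
    ("secret", 11, "secret"), ("api key", 11, "secret") ]

-- the for-loop of Source B with its two breaks, as structural recursion over _SUBSTR
def pvScan (normalized : String) (best : Option (Int × String)) :
    List (String × Int × String) → Option (Int × String)
  | [] => best
  | (sub, pr, cat) :: rest =>
      match best with
      | some b => if pr ≥ b.1 then best
                  else if PySem.Str.isIn sub normalized then some (pr, cat)
                  else pvScan normalized best rest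
      | none   => if PySem.Str.isIn sub normalized then some (pr, cat)
                  else pvScan normalized none rest

def canonicalize_prediction_label_alt (label : String) : Option String :=
  let normalized := PySem.Str.lower (PySem.Str.strip label)
  match pvScan normalized (PySem.Dict.get? pvExact normalized) pvSubstr with
  | some b => some b.2
  | none => none

-- ===== PRECONDITION & SPEC =====
def Spec_canonicalize_prediction_label (label : String) (out : Option String) : Prop := out = canonicalize_prediction_label_alt label
instance (label : String) (out : Option String) : Decidable (Spec_canonicalize_prediction_label label out) := by unfold Spec_canonicalize_prediction_label; infer_instance

-- ===== CLAIM (what is proved, stated in full; the proofs are below) =====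
def Claim_equal_canonicalize_prediction_label : Prop := ∀ (label : String), Dom_canonicalize_prediction_label label → Spec_canonicalize_prediction_label label (canonicalize_prediction_label label)

-- ===== LEMMAS AND PROOFS =====

-- characterization of the _EXACT dict lookup by key group (proof helper)
theorem pvExact_get (n : String) : PySem.Dict.get? pvExact n =
    (if (["full name", "first name", "middle name", "last name", "name", "name initials", "nickname"] : List String).contains n then some ((0 : Int), "person")
     else if (["ner_per"] : List String).contains n then some ((3 : Int), "person")
     else if (["ner_org"] : List String).contains n then some ((4 : Int), "organization")
     else if (["ner_loc", "city", "district", "street address", "postal code", "street", "region", "country", "house", "building", "apartment", "geolocation"] : List String).contains n then some ((7 : Int), "location")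
     else none) := by
  by_cases hk0 : n = "full name"
  · subst hk0; decide
  by_cases hk1 : n = "first name"
  · subst hk1; decide
  by_cases hk2 : n = "middle name"
  · subst hk2; decide
  by_cases hk3 : n = "last name"
  · subst hk3; decide
  by_cases hk4 : n = "name"
  · subst hk4; decide
  by_cases hk5 : n = "name initials"
  · subst hk5; decide
  by_cases hk6 : n = "nickname"
  · subst hk6; decide
  by_cases hk7 : n = "ner_per"
  · subst hk7; decide
  by_cases hk8 : n = "ner_org"
  · subst hk8; decide
  by_cases hk9 : n = "ner_loc"
  · subst hk9; decide
  by_cases hk10 : n = "city"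
  · subst hk10; decide
  by_cases hk11 : n = "district"
  · subst hk11; decide
  by_cases hk12 : n = "street address"
  · subst hk12; decide
  by_cases hk13 : n = "postal code"
  · subst hk13; decide
  by_cases hk14 : n = "street"
  · subst hk14; decide
  by_cases hk15 : n = "region"
  · subst hk15; decide
  by_cases hk16 : n = "country"
  · subst hk16; decide
  by_cases hk17 : n = "house"
  · subst hk17; decide
  by_cases hk18 : n = "building"
  · subst hk18; decide
  by_cases hk19 : n = "apartment"
  · subst hk19; decide
  by_cases hk20 : n = "geolocation"
  · subst hk20; decide
  simp [pvExact, List.contains_eq_mem, PySem.Dict.get?, hk0, hk1, hk2, hk3, hk4, hk5, hk6, hk7, hk8, hk9, hk10, hk11, hk12, hk13, hk14, hk15, hk16, hk17, hk18, hk19, hk20, Ne.symm hk0, Ne.symm hk1, Ne.symm hk2, Ne.symm hk3, Ne.symm hk4, Ne.symm hk5, Ne.symm hk6, Ne.symm hk7, Ne.symm hk8, Ne.symm hk9, Ne.symm hk10, Ne.symm hk11, Ne.symm hk12, Ne.symm hk13, Ne.symm hk14, Ne.symm hk15, Ne.symm hk16, Ne.symm hk17, Ne.symm hk18, Ne.symm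 hk19, Ne.symm hk20]

-- the equivalence, input-generalized
theorem pv_main (label : String) : canonicalize_prediction_label label = canonicalize_prediction_label_alt label := by
  unfold canonicalize_prediction_label canonicalize_prediction_label_alt
  generalize PySem.Str.lower (PySem.Str.strip label) = n
  simp only [pvExact_get]
  by_cases hc0 : n = "full name" ∨ n = "first name" ∨ n = "middle name" ∨ n = "last name" ∨ n = "name" ∨ n = "name initials" ∨ n = "nickname"
  · simp [pvScan, pvSubstr, hc0]
  by_cases hp : n = "ner_per"
  · subst hp; decide
  by_cases ho : n = "ner_org"
  · subst ho; decide
  by_cases hl : n = "ner_loc" ∨ n = "city" ∨ n = "district" ∨ n = "street address" ∨ n = "postal code" ∨ n = "street" ∨ n = "region" ∨ n = "country" ∨ n = "house" ∨ n = "building" ∨ n = "apartment" ∨ n = "geolocation"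
  · by_cases hs_email : PySem.Chars.isIn ['e', 'm', 'a', 'i', 'l'] n.toList = true
    · simp [pvScan, pvSubstr, hc0, hp, ho, hl, hs_email]
    by_cases hs_phone : PySem.Chars.isIn ['p', 'h', 'o', 'n', 'e'] n.toList = true
    · simp [pvScan, pvSubstr, hc0, hp, ho, hl, hs_email, hs_phone]
    by_cases hs_person : PySem.Chars.isIn ['p', 'e', 'r', 's', 'o', 'n'] n.toList = true
    · simp [pvScan, pvSubstr, hc0, hp, ho, hl, hs_email, hs_phone, hs_person]
    by_cases hs_organization : PySem.Chars.isIn ['o', 'r', 'g', 'a', 'n', 'i', 'z', 'a', 't', 'i', 'o', 'n'] n.toList = true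
    · simp [pvScan, pvSubstr, hc0, hp, ho, hl, hs_email, hs_phone, hs_person, hs_organization]
    by_cases hs_org : PySem.Chars.isIn ['o', 'r', 'g'] n.toList = true
    · simp [pvScan, pvSubstr, hc0, hp, ho, hl, hs_email, hs_phone, hs_person, hs_organization, hs_org]
    by_cases hs_ip : PySem.Chars.isIn ['i', 'p'] n.toList = true
    · simp [pvScan, pvSubstr, hc0, hp, ho, hl, hs_email, hs_phone, hs_person, hs_organization, hs_org, hs_ip]
    by_cases hs_date : PySem.Chars.isIn ['d', 'a', 't', 'e'] n.toList = true
    · simp [pvScan, pvSubstr, hc0, hp, ho, hl, hs_email, hs_phone, hs_person, hs_organization, hs_org, hs_ip, hs_date]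
    simp [pvScan, pvSubstr, hc0, hp, ho, hl, hs_email, hs_phone, hs_person, hs_organization, hs_org, hs_ip, hs_date]
  by_cases hs_email : PySem.Chars.isIn ['e', 'm', 'a', 'i', 'l'] n.toList = true
  · simp [pvScan, pvSubstr, hc0, hp, ho, hl, hs_email]
  by_cases hs_phone : PySem.Chars.isIn ['p', 'h', 'o', 'n', 'e'] n.toList = true
  · simp [pvScan, pvSubstr, hc0, hp, ho, hl, hs_email, hs_phone]
  by_cases hs_person : PySem.Chars.isIn ['p', 'e', 'r', 's', 'o', 'n'] n.toList = true
  · simp [pvScan, pvSubstr, hc0, hp, ho, hl, hs_email, hs_phone, hs_person]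
  by_cases hs_organization : PySem.Chars.isIn ['o', 'r', 'g', 'a', 'n', 'i', 'z', 'a', 't', 'i', 'o', 'n'] n.toList = true
  · simp [pvScan, pvSubstr, hc0, hp, ho, hl, hs_email, hs_phone, hs_person, hs_organization]
  by_cases hs_org : PySem.Chars.isIn ['o', 'r', 'g'] n.toList = true
  · simp [pvScan, pvSubstr, hc0, hp, ho, hl, hs_email, hs_phone, hs_person, hs_organization, hs_org]
  by_cases hs_ip : PySem.Chars.isIn ['i', 'p'] n.toList = true
  · simp [pvScan, pvSubstr, hc0, hp, ho, hl, hs_email, hs_phone, hs_person, hs_organization, hs_org, hs_ip]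
  by_cases hs_date : PySem.Chars.isIn ['d', 'a', 't', 'e'] n.toList = true
  · simp [pvScan, pvSubstr, hc0, hp, ho, hl, hs_email, hs_phone, hs_person, hs_organization, hs_org, hs_ip, hs_date]
  by_cases hs_location : PySem.Chars.isIn ['l', 'o', 'c', 'a', 't', 'i', 'o', 'n'] n.toList = true
  · simp [pvScan, pvSubstr, hc0, hp, ho, hl, hs_email, hs_phone, hs_person, hs_organization, hs_org, hs_ip, hs_date, hs_location]
  by_cases hs_address : PySem.Chars.isIn ['a', 'd', 'd', 'r', 'e', 's', 's'] n.toList = true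
  · simp [pvScan, pvSubstr, hc0, hp, ho, hl, hs_email, hs_phone, hs_person, hs_organization, hs_org, hs_ip, hs_date, hs_location, hs_address]
  by_cases hs_card : PySem.Chars.isIn ['c', 'a', 'r', 'd'] n.toList = true
  · simp [pvScan, pvSubstr, hc0, hp, ho, hl, hs_email, hs_phone, hs_person, hs_organization, hs_org, hs_ip, hs_date, hs_location, hs_address, hs_card]
  by_cases hs_passport : PySem.Chars.isIn ['p', 'a', 's', 's', 'p', 'o', 'r', 't'] n.toList = true
  · simp [pvScan, pvSubstr, hc0, hp, ho, hl, hs_email, hs_phone, hs_person, hs_organization, hs_org, hs_ip, hs_date, hs_location, hs_address, hs_card, hs_passport]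
  by_cases hs_document : PySem.Chars.isIn ['d', 'o', 'c', 'u', 'm', 'e', 'n', 't'] n.toList = true
  · simp [pvScan, pvSubstr, hc0, hp, ho, hl, hs_email, hs_phone, hs_person, hs_organization, hs_org, hs_ip, hs_date, hs_location, hs_address, hs_card, hs_passport, hs_document]
  by_cases hs_snils : PySem.Chars.isIn ['s', 'n', 'i', 'l', 's'] n.toList = true
  · simp [pvScan, pvSubstr, hc0, hp, ho, hl, hs_email, hs_phone, hs_person, hs_organization, hs_org, hs_ip, hs_date, hs_location, hs_address, hs_card, hs_passport, hs_document, hs_snils]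
  by_cases hs_inn : PySem.Chars.isIn ['i', 'n', 'n'] n.toList = true
  · simp [pvScan, pvSubstr, hc0, hp, ho, hl, hs_email, hs_phone, hs_person, hs_organization, hs_org, hs_ip, hs_date, hs_location, hs_address, hs_card, hs_passport, hs_document, hs_snils, hs_inn]
  by_cases hs_ogrn : PySem.Chars.isIn ['o', 'g', 'r', 'n'] n.toList = true
  · simp [pvScan, pvSubstr, hc0, hp, ho, hl, hs_email, hs_phone, hs_person, hs_organization, hs_org, hs_ip, hs_date, hs_location, hs_address, hs_card, hs_passport, hs_document, hs_snils, hs_inn, hs_ogrn]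
  by_cases hs_ssn : PySem.Chars.isIn ['s', 's', 'n'] n.toList = true
  · simp [pvScan, pvSubstr, hc0, hp, ho, hl, hs_email, hs_phone, hs_person, hs_organization, hs_org, hs_ip, hs_date, hs_location, hs_address, hs_card, hs_passport, hs_document, hs_snils, hs_inn, hs_ogrn, hs_ssn]
  by_cases hs_iban : PySem.Chars.isIn ['i', 'b', 'a', 'n'] n.toList = true
  · simp [pvScan, pvSubstr, hc0, hp, ho, hl, hs_email, hs_phone, hs_person, hs_organization, hs_org, hs_ip, hs_date, hs_location, hs_address, hs_card, hs_passport, hs_document, hs_snils, hs_inn, hs_ogrn, hs_ssn, hs_iban]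
  by_cases hs_swift : PySem.Chars.isIn ['s', 'w', 'i', 'f', 't'] n.toList = true
  · simp [pvScan, pvSubstr, hc0, hp, ho, hl, hs_email, hs_phone, hs_person, hs_organization, hs_org, hs_ip, hs_date, hs_location, hs_address, hs_card, hs_passport, hs_document, hs_snils, hs_inn, hs_ogrn, hs_ssn, hs_iban, hs_swift]
  by_cases hs_tin : PySem.Chars.isIn ['t', 'i', 'n'] n.toList = true
  · simp [pvScan, pvSubstr, hc0, hp, ho, hl, hs_email, hs_phone, hs_person, hs_organization, hs_org, hs_ip, hs_date, hs_location, hs_address, hs_card, hs_passport, hs_document, hs_snils, hs_inn, hs_ogrn, hs_ssn, hs_iban, hs_swift, hs_tin]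
  by_cases hs_vehicle : PySem.Chars.isIn ['v', 'e', 'h', 'i', 'c', 'l', 'e'] n.toList = true
  · simp [pvScan, pvSubstr, hc0, hp, ho, hl, hs_email, hs_phone, hs_person, hs_organization, hs_org, hs_ip, hs_date, hs_location, hs_address, hs_card, hs_passport, hs_document, hs_snils, hs_inn, hs_ogrn, hs_ssn, hs_iban, hs_swift, hs_tin, hs_vehicle]
  by_cases hs_military : PySem.Chars.isIn ['m', 'i', 'l', 'i', 't', 'a', 'r', 'y'] n.toList = true
  · simp [pvScan, pvSubstr, hc0, hp, ho, hl, hs_email, hs_phone, hs_person, hs_organization, hs_org, hs_ip, hs_date, hs_location, hs_address, hs_card, hs_passport, hs_document, hs_snils, hs_inn, hs_ogrn, hs_ssn, hs_iban, hs_swift, hs_tin, hs_vehicle, hs_military]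
  by_cases hs_vin : PySem.Chars.isIn ['v', 'i', 'n'] n.toList = true
  · simp [pvScan, pvSubstr, hc0, hp, ho, hl, hs_email, hs_phone, hs_person, hs_organization, hs_org, hs_ip, hs_date, hs_location, hs_address, hs_card, hs_passport, hs_document, hs_snils, hs_inn, hs_ogrn, hs_ssn, hs_iban, hs_swift, hs_tin, hs_vehicle, hs_military, hs_vin]
  by_cases hs_id : PySem.Chars.isIn ['i', 'd'] n.toList = true
  · simp [pvScan, pvSubstr, hc0, hp, ho, hl, hs_email, hs_phone, hs_person, hs_organization, hs_org, hs_ip, hs_date, hs_location, hs_address, hs_card, hs_passport, hs_document, hs_snils, hs_inn, hs_ogrn, hs_ssn, hs_iban, hs_swift, hs_tin, hs_vehicle, hs_military, hs_vin, hs_id]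
  by_cases hs_secret : PySem.Chars.isIn ['s', 'e', 'c', 'r', 'e', 't'] n.toList = true
  · simp [pvScan, pvSubstr, hc0, hp, ho, hl, hs_email, hs_phone, hs_person, hs_organization, hs_org, hs_ip, hs_date, hs_location, hs_address, hs_card, hs_passport, hs_document, hs_snils, hs_inn, hs_ogrn, hs_ssn, hs_iban, hs_swift, hs_tin, hs_vehicle, hs_military, hs_vin, hs_id, hs_secret]
  by_cases hs_api_key : PySem.Chars.isIn ['a', 'p', 'i', ' ', 'k', 'e', 'y'] n.toList = true
  · simp [pvScan, pvSubstr, hc0, hp, ho, hl, hs_email, hs_phone, hs_person, hs_organization, hs_org, hs_ip, hs_date, hs_location, hs_address, hs_card, hs_passport, hs_document, hs_snils, hs_inn, hs_ogrn, hs_ssn, hs_iban, hs_swift, hs_tin, hs_vehicle, hs_military, hs_vin, hs_id, hs_secret, hs_api_key]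
  simp [pvScan, pvSubstr, hc0, hp, ho, hl, hs_email, hs_phone, hs_person, hs_organization, hs_org, hs_ip, hs_date, hs_location, hs_address, hs_card, hs_passport, hs_document, hs_snils, hs_inn, hs_ogrn, hs_ssn, hs_iban, hs_swift, hs_tin, hs_vehicle, hs_military, hs_vin, hs_id, hs_secret, hs_api_key]


-- ===== VERDICT (by name: the statement is the Claim_ definition above) =====
theorem canonicalize_prediction_label_spec : Claim_equal_canonicalize_prediction_label := by
  intro label _
  exact pv_main label
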